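-- pv_equiv track=rewrite | github.com/CGCL-codes/naturalcc | third_party/metrics_evaluation/metrics/sacrebleu_code/sacrebleu_methods/metrics/lib_ter.py | _find_shifted_pairs
-- ===== SOURCE A (Python) =====
-- from typing import List, Tuple, Dict
--
-- _MAX_SHIFT_SIZE = 10
--
-- _MAX_SHIFT_DIST = 50
--
-- def _find_shifted_pairs(words_h: List[str], words_r: List[str]):
--     """Find matching word sub-sequences in two lists of words.
--
--     Ignores sub-sequences starting at the same position.
--
--     :param words_h: First word list.
--     :param words_r: Second word list.
--     :return: Yields tuples of (h_start, r_start, length) such that: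
--          words_h[h_start:h_start+length] = words_r[r_start:r_start+length]
--     """
--     n_words_h = len(words_h)
--     n_words_r = len(words_r)
--     for start_h in range(n_words_h):
--         for start_r in range(n_words_r):
--             # this is slightly different from what tercom does but this should
--             # really only kick in in degenerate cases
--             if abs(start_r - start_h) > _MAX_SHIFT_DIST:
--                 continue
--
--             length = 0
--             while (
--                 words_h[start_h + length] == words_r[start_r + length]
--                 and length < _MAX_SHIFT_SIZE
--             ):
--                 length += 1
--
--                 yield start_h, start_r, length
--
--                 # If one sequence is consumed, stop processing
--                 if n_words_h == start_h + length or n_words_r == start_r + length: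
--                     break
-- ===== SOURCE B (Python) =====
-- _MAX_SHIFT_SIZE = 10
--
-- _MAX_SHIFT_DIST = 50
--
--
-- def _find_shifted_pairs(words_h, words_r):
--     """Index-based re-implementation: build a hash index word -> positions in
--     words_r once, then for each start_h visit only the positions where the
--     first word already matches (sorted, so stop past the shift window) and
--     emit all prefixes of the capped common run in one batch."""
--     occ = {}
--     for j, w in enumerate(words_r):
--         occ.setdefault(w, []).append(j)
--     n_h = len(words_h)
--     n_r = len(words_r)
--     for i, w in enumerate(words_h):
--         for j in occ.get(w, ()):
--             if j > i + _MAX_SHIFT_DIST: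
--                 break
--             if j < i - _MAX_SHIFT_DIST:
--                 continue
--             cap = min(_MAX_SHIFT_SIZE, n_h - i, n_r - j)
--             m = 1
--             while m < cap and words_h[i + m] == words_r[j + m]:
--                 m += 1
--             for length in range(1, m + 1):
--                 yield i, j, length
-- ===== Notes on version B (the rewrite author's own statement) =====
-- stated objective: alternative
-- what changed: B builds a hash index word -> sorted positions in words_r once, then per start_h iterates only the positions where the first word already matches (breaking past the +50 shift window), computing the capped run length once and emitting all prefixes in a batch, instead of A's full scan of every start_r with a per-step yield/break while loop.
import Mathlib
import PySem

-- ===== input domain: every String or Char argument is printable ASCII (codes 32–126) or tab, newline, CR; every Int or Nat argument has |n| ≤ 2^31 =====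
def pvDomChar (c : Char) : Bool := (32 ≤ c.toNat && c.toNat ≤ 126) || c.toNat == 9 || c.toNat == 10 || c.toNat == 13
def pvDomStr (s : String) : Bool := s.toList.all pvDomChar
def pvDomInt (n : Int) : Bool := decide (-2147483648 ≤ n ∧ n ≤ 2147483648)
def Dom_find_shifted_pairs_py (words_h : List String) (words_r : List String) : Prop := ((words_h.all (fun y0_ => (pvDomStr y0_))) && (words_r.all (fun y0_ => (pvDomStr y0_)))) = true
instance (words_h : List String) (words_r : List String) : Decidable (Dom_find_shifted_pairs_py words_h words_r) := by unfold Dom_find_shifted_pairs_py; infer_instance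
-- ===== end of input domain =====

-- B builds a hash index word -> positions in words_r once and, per start_h, visits only
-- the (sorted) positions whose first word already matches, stopping past the shift window
-- and emitting the prefixes of the capped common run in one batch, instead of A's scan of
-- every start_r with a yield-per-step while loop.

-- ===== PORT A =====
-- the inner `while` of A: `length` is the loop variable; fuel 11 suffices since the
-- loop body runs only while length < 10.  The list comparison
-- `words_h[start_h+length] == words_r[start_r+length]` is ported with pyGet?; on every
-- reachable state both indices are in range (Python never raises here).
def pyLoopA (wh wr : List String) (sh sr : Nat) : Nat → Nat → List (List Int)
  | _, 0 => []
  | len, fuel+1 =>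
    if (PySem.List.pyGet? wh ((sh : Int) + len) == PySem.List.pyGet? wr ((sr : Int) + len))
        && decide (len < 10) then
      [[(sh : Int), (sr : Int), ((len : Int) + 1)]] ++
        (if wh.length = sh + (len + 1) ∨ wr.length = sr + (len + 1) then []
         else pyLoopA wh wr sh sr (len + 1) fuel)
    else []

def find_shifted_pairs_py (words_h : List String) (words_r : List String) : List (List Int) :=
  (List.range words_h.length).foldl (fun acc (start_h : Nat) =>
    (List.range words_r.length).foldl (fun acc2 (start_r : Nat) =>
      if ((start_r : Int) - (start_h : Int)).natAbs > 50 then acc2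
      else acc2 ++ pyLoopA words_h words_r start_h start_r 0 11) acc) []

-- ===== PORT B =====
-- `for j, w in enumerate(words_r): occ.setdefault(w, []).append(j)`
def buildOccB : List String → Nat → PySem.Dict String (List Nat) → PySem.Dict String (List Nat)
  | [], _, d => d
  | w :: rest, j, d => buildOccB rest (j + 1) (d.insert w (d.getD w [] ++ [j]))

-- B's `while m < cap and words_h[i+m] == words_r[j+m]`: the bound `m < cap` is
-- carried as the remaining fuel `rem = cap - m`.
def pyMatchLenB (wh wr : List String) (i j : Nat) : Nat → Nat → Nat
  | m, 0 => m
  | m, rem+1 =>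
    if PySem.List.pyGet? wh ((i : Int) + m) == PySem.List.pyGet? wr ((j : Int) + m) then
      pyMatchLenB wh wr i j (m + 1) rem
    else m

-- B's inner `for j in occ.get(w, ())`, with `break` past i+50 and `continue` below
-- i-50 (Nat truncated subtraction `i - 50` agrees with Python's `j < i - 50`, which is
-- false for every j ≥ 0 whenever i ≤ 50).
def innerB (wh wr : List String) (i : Nat) : List Nat → List (List Int) → List (List Int)
  | [], acc => acc
  | j :: rest, acc =>
    if i + 50 < j then acc
    else if j < i - 50 then innerB wh wr i rest acc
    else
      let cap := min 10 (min (wh.length - i) (wr.length - j))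
      let m := pyMatchLenB wh wr i j 1 (cap - 1)
      innerB wh wr i rest
        (acc ++ (List.range' 1 m).map (fun l => [(i : Int), (j : Int), (l : Int)]))

-- B's outer `for i, w in enumerate(words_h)`
def outerB (wh wr : List String) (occ : PySem.Dict String (List Nat)) :
    List String → Nat → List (List Int) → List (List Int)
  | [], _, acc => acc
  | w :: rest, i, acc => outerB wh wr occ rest (i + 1) (innerB wh wr i (occ.getD w []) acc)

def find_shifted_pairs_py_alt (words_h : List String) (words_r : List String) : List (List Int) :=
  let occ := buildOccB words_r 0 PySem.Dict.empty
  outerB words_h words_r occ words_h 0 []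

-- ===== PRECONDITION & SPEC =====
def Spec_find_shifted_pairs_py (words_h : List String) (words_r : List String) (out : List (List Int)) : Prop := out = find_shifted_pairs_py_alt words_h words_r
instance (words_h : List String) (words_r : List String) (out : List (List Int)) : Decidable (Spec_find_shifted_pairs_py words_h words_r out) := by unfold Spec_find_shifted_pairs_py; infer_instance

-- ===== CLAIM (what is proved, stated in full; the proofs are below) =====
def Claim_equal_find_shifted_pairs_py : Prop := ∀ (words_h : List String) (words_r : List String), Dom_find_shifted_pairs_py words_h words_r → Spec_find_shifted_pairs_py words_h words_r (find_shifted_pairs_py words_h words_r)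

-- ===== LEMMAS AND PROOFS =====

-- the per-(i,j) segment both programs produce
def pvSeg (i j m : Nat) : List (List Int) :=
  (List.range' 1 m).map (fun l => [(i : Int), (j : Int), (l : Int)])

def pvCap (wh wr : List String) (i j : Nat) : Nat :=
  min 10 (min (wh.length - i) (wr.length - j))

-- the contribution of the pair (i, j) (empty outside the shift window)
def pvGB (wh wr : List String) (i j : Nat) : List (List Int) :=
  if i + 50 < j then []
  else if j < i - 50 then []
  else pvSeg i j (pyMatchLenB wh wr i j 1 (pvCap wh wr i j - 1))

-- the contribution of row i: only columns whose first word matches contribute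
def pvH (wh wr : List String) (i : Nat) : List (List Int) :=
  (List.range wr.length).flatMap
    (fun j => if wr.getD j "" == wh.getD i "" then pvGB wh wr i j else [])

-- positions (offset by j0) of w in ws, in order
def occIdx : List String → Nat → String → List Nat
  | [], _, _ => []
  | x :: rest, j, w => (if x == w then [j] else []) ++ occIdx rest (j + 1) w

theorem pyMatchLenB_spec (wh wr : List String) (sh sr : Nat) :
    ∀ (rem k : Nat),
      k ≤ pyMatchLenB wh wr sh sr k rem ∧
      pyMatchLenB wh wr sh sr k rem ≤ k + rem ∧
      (∀ i, k ≤ i → i < pyMatchLenB wh wr sh sr k rem →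
        (PySem.List.pyGet? wh ((sh : Int) + i) == PySem.List.pyGet? wr ((sr : Int) + i)) = true) ∧
      (pyMatchLenB wh wr sh sr k rem < k + rem →
        (PySem.List.pyGet? wh ((sh : Int) + pyMatchLenB wh wr sh sr k rem)
          == PySem.List.pyGet? wr ((sr : Int) + pyMatchLenB wh wr sh sr k rem)) = false) := by
  intro rem
  induction rem with
  | zero =>
    intro k
    simp [pyMatchLenB]
    omega
  | succ n ih =>
    intro k
    by_cases h : (PySem.List.pyGet? wh ((sh : Int) + k) == PySem.List.pyGet? wr ((sr : Int) + k)) = true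
    · have hrec := ih (k + 1)
      have hun : pyMatchLenB wh wr sh sr k (n + 1) = pyMatchLenB wh wr sh sr (k + 1) n := by
        simp [pyMatchLenB, h]
      rw [hun]
      refine ⟨by omega, by omega, ?_, by intro h'; exact hrec.2.2.2 (by omega)⟩
      intro i hki hi
      rcases Nat.eq_or_lt_of_le hki with heq | hlt
      · exact heq ▸ h
      · exact hrec.2.2.1 i hlt hi
    · have hb : (PySem.List.pyGet? wh ((sh : Int) + k) == PySem.List.pyGet? wr ((sr : Int) + k)) = false := by
        simpa using h
      have hun : pyMatchLenB wh wr sh sr k (n + 1) = k := by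
        simp [pyMatchLenB, hb]
      rw [hun]
      refine ⟨le_refl _, by omega, ?_, ?_⟩
      · intro i h1 h2; omega
      · intro _; simpa using h

-- loopA produces exactly the prefixes (len+1 .. m) once its invariants hold
theorem pyLoopA_eq_seg (wh wr : List String) (sh sr : Nat) (m : Nat)
    (hmcap : m ≤ min 10 (min (wh.length - sh) (wr.length - sr)))
    (hmatch : ∀ i, i < m →
      (PySem.List.pyGet? wh ((sh : Int) + i) == PySem.List.pyGet? wr ((sr : Int) + i)) = true)
    (hstop : m < min 10 (min (wh.length - sh) (wr.length - sr)) →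
      (PySem.List.pyGet? wh ((sh : Int) + m) == PySem.List.pyGet? wr ((sr : Int) + m)) = false) :
    ∀ (fuel len : Nat), sh + len < wh.length → sr + len < wr.length → len ≤ m →
      m - len < fuel →
      pyLoopA wh wr sh sr len fuel =
        (List.range' (len + 1) (m - len)).map (fun l => [(sh : Int), (sr : Int), (l : Int)]) := by
  intro fuel
  induction fuel with
  | zero => intro len _ _ _ h; omega
  | succ f ih =>
    intro len hh hr hlen hfuel
    rcases Nat.eq_or_lt_of_le hlen with heq | hlt
    · -- len = m : the loop condition is false
      subst heq
      have hcond : ((PySem.List.pyGet? wh ((sh : Int) + len)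
          == PySem.List.pyGet? wr ((sr : Int) + len)) && decide (len < 10)) = false := by
        by_cases h10 : len < 10
        · have : len < min 10 (min (wh.length - sh) (wr.length - sr)) := by omega
          simp [hstop this]
        · simp [h10]
      simp [pyLoopA, hcond]
    · -- len < m : condition true, yield, maybe break
      have h10 : len < 10 := by omega
      have hcond : ((PySem.List.pyGet? wh ((sh : Int) + len)
          == PySem.List.pyGet? wr ((sr : Int) + len)) && decide (len < 10)) = true := by
        simp [hmatch len hlt, h10]
      have hrange : List.range' (len + 1) (m - len) =
          (len + 1) :: List.range' (len + 2) (m - (len + 1)) := by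
        have : m - len = (m - (len + 1)) + 1 := by omega
        rw [this, List.range'_succ]
      by_cases hbrk : wh.length = sh + (len + 1) ∨ wr.length = sr + (len + 1)
      · have hm : m = len + 1 := by omega
        simp [pyLoopA, hcond, hbrk, hm]
      · have hh' : sh + (len + 1) < wh.length := by omega
        have hr' : sr + (len + 1) < wr.length := by omega
        have := ih (len + 1) hh' hr' (by omega) (by omega)
        simp [pyLoopA, hcond, hbrk, hrange, this]

-- occIdx characterises what buildOccB stores under each key
theorem buildOccB_getD : ∀ (ws : List String) (j : Nat) (d : PySem.Dict String (List Nat))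
    (w : String), (buildOccB ws j d).getD w [] = d.getD w [] ++ occIdx ws j w := by
  intro ws
  induction ws with
  | nil => intro j d w; simp [buildOccB, occIdx]
  | cons x rest ih =>
    intro j d w
    rw [buildOccB, ih, occIdx]
    rw [PySem.Dict.getD_insert]
    by_cases hxw : x = w
    · subst hxw; simp
    · have : ¬ w = x := fun h => hxw h.symm
      simp [this, hxw]

theorem occIdx_le : ∀ (ws : List String) (j : Nat) (w : String) (x : Nat),
    x ∈ occIdx ws j w → j ≤ x := by
  intro ws
  induction ws with
  | nil => intro j w x hx; simp [occIdx] at hx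
  | cons y rest ih =>
    intro j w x hx
    rw [occIdx] at hx
    rcases List.mem_append.mp hx with h | h
    · split at h <;> simp at h; omega
    · have := ih (j + 1) w x h; omega

theorem occIdx_pairwise : ∀ (ws : List String) (j : Nat) (w : String),
    (occIdx ws j w).Pairwise (· < ·) := by
  intro ws
  induction ws with
  | nil => intro j w; simp [occIdx]
  | cons y rest ih =>
    intro j w
    rw [occIdx]
    split
    · refine List.pairwise_cons.mpr ⟨?_, ih (j + 1) w⟩
      intro a ha
      have := occIdx_le rest (j + 1) w a ha
      omega
    · simpa using ih (j + 1) w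

theorem occIdx_flatMap (w : String) (g : Nat → List (List Int)) :
    ∀ (ws : List String) (j : Nat),
      (occIdx ws j w).flatMap g =
        (List.range' j ws.length).flatMap
          (fun k => if ws.getD (k - j) "" == w then g k else []) := by
  intro ws
  induction ws with
  | nil => intro j; simp [occIdx]
  | cons x rest ih =>
    intro j
    rw [occIdx, List.length_cons, List.range'_succ, List.flatMap_append, List.flatMap_cons,
      ih (j + 1)]
    have hhd : (if x == w then [j] else []).flatMap g = (if x == w then g j else []) := by
      split <;> simp
    have hx : (x :: rest).getD (j - j) "" = x := by simp
    have htl : (List.range' (j + 1) rest.length).flatMap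
        (fun k => if rest.getD (k - (j + 1)) "" == w then g k else []) =
        (List.range' (j + 1) rest.length).flatMap
        (fun k => if (x :: rest).getD (k - j) "" == w then g k else []) := by
      apply List.flatMap_congr
      intro k hk
      have hk1 : j + 1 ≤ k := (List.mem_range'_1.mp hk).1
      have : k - j = (k - (j + 1)) + 1 := by omega
      rw [this]
      simp
    rw [hhd, hx, htl]

-- B's inner loop over a strictly increasing position list is the flatMap of pvGB
theorem innerB_eq (wh wr : List String) (i : Nat) :
    ∀ (js : List Nat), js.Pairwise (· < ·) → ∀ (acc : List (List Int)),
      innerB wh wr i js acc = acc ++ js.flatMap (pvGB wh wr i) := by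
  intro js
  induction js with
  | nil => intro _ acc; simp [innerB]
  | cons j rest ih =>
    intro hp acc
    have hp' := List.pairwise_cons.mp hp
    rw [innerB, List.flatMap_cons]
    by_cases h1 : i + 50 < j
    · rw [if_pos h1]
      have hj : pvGB wh wr i j = [] := by rw [pvGB, if_pos h1]
      have hrest : rest.flatMap (pvGB wh wr i) = [] := by
        apply List.flatMap_eq_nil_iff.mpr
        intro x hx
        rw [pvGB, if_pos (by have := hp'.1 x hx; omega)]
      rw [hj, hrest]; simp
    · rw [if_neg h1]
      by_cases h2 : j < i - 50
      · rw [if_pos h2, ih hp'.2]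
        have hj : pvGB wh wr i j = [] := by rw [pvGB, if_neg h1, if_pos h2]
        rw [hj]; simp
      · rw [if_neg h2]
        have hj : pvGB wh wr i j =
            pvSeg i j (pyMatchLenB wh wr i j 1 (pvCap wh wr i j - 1)) := by
          rw [pvGB, if_neg h1, if_neg h2]
        rw [ih hp'.2, hj, pvSeg, pvCap]
        simp

-- B's outer loop over the suffix of words_h starting at i
theorem outerB_eq (wh wr : List String) :
    ∀ (ws : List String) (i : Nat), ws = wh.drop i → ∀ (acc : List (List Int)),
      outerB wh wr (buildOccB wr 0 PySem.Dict.empty) ws i acc =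
        acc ++ (List.range' i ws.length).flatMap (pvH wh wr) := by
  intro ws
  induction ws with
  | nil => intro i _ acc; simp [outerB]
  | cons w rest ih =>
    intro i hws acc
    have hi : wh[i]? = some w := by
      have := congrArg List.head? hws
      simpa [List.head?_drop] using this.symm
    have hrest : rest = wh.drop (i + 1) := by
      have := congrArg List.tail hws
      simpa [List.tail_drop] using this
    rw [outerB, List.length_cons, List.range'_succ, List.flatMap_cons,
      ih (i + 1) hrest]
    have hocc : (buildOccB wr 0 PySem.Dict.empty).getD w [] = occIdx wr 0 w := by
      rw [buildOccB_getD]; simp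
    have hin : innerB wh wr i ((buildOccB wr 0 PySem.Dict.empty).getD w []) acc =
        acc ++ pvH wh wr i := by
      rw [hocc, innerB_eq wh wr i _ (occIdx_pairwise wr 0 w) acc]
      congr 1
      rw [occIdx_flatMap w (pvGB wh wr i) wr 0, pvH, List.range_eq_range']
      apply List.flatMap_congr
      intro k _
      simp [List.getD, hi]
    rw [hin, List.append_assoc]

-- the term A's inner fold contributes at column j equals pvH's term
theorem pyLoopA_term_eq (wh wr : List String) (i j : Nat)
    (hi : i < wh.length) (hj : j < wr.length) :
    (if ((j : Int) - (i : Int)).natAbs > 50 then ([] : List (List Int))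
     else pyLoopA wh wr i j 0 11) =
    (if wr.getD j "" == wh.getD i "" then pvGB wh wr i j else []) := by
  have hih : wh.getD i "" = wh[i] := List.getD_eq_getElem wh "" hi
  have hjr : wr.getD j "" = wr[j] := List.getD_eq_getElem wr "" hj
  by_cases hw : ((j : Int) - (i : Int)).natAbs > 50
  · rw [if_pos hw]
    by_cases hm : wr.getD j "" == wh.getD i ""
    · rw [if_pos hm, pvGB]
      by_cases h1 : i + 50 < j
      · rw [if_pos h1]
      · rw [if_neg h1, if_pos (by omega)]
    · rw [if_neg hm]
  · rw [if_neg hw]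
    have hget0 : PySem.List.pyGet? wh ((i : Int) + ((0 : Nat) : Int)) = some wh[i] := by
      simp [PySem.List.pyGet?_natCast, List.getElem?_eq_getElem hi]
    have hget0' : PySem.List.pyGet? wr ((j : Int) + ((0 : Nat) : Int)) = some wr[j] := by
      simp [PySem.List.pyGet?_natCast, List.getElem?_eq_getElem hj]
    by_cases hm : wr.getD j "" == wh.getD i ""
    · rw [if_pos hm, pvGB, if_neg (by omega), if_neg (by omega)]
      have heq : wh[i] = wr[j] := by
        have := eq_of_beq hm
        rw [hih, hjr] at this
        exact this.symm
      have hcap1 : 1 ≤ pvCap wh wr i j := by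
        simp only [pvCap]; omega
      have hcap10 : pvCap wh wr i j ≤ 10 := by
        simp only [pvCap]; omega
      set m := pyMatchLenB wh wr i j 1 (pvCap wh wr i j - 1) with hm_def
      have hspec := pyMatchLenB_spec wh wr i j (pvCap wh wr i j - 1) 1
      have hmle : m ≤ pvCap wh wr i j := by
        have h2 := hspec.2.1; omega
      have := pyLoopA_eq_seg wh wr i j m
        hmle
        (by
          intro k hk
          rcases Nat.eq_zero_or_pos k with h0 | h0
          · subst h0
            rw [hget0, hget0', heq]
            simp
          · exact hspec.2.2.1 k (by omega) hk)
        (by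
          intro hlt
          have hlt' : m < pvCap wh wr i j := hlt
          exact hspec.2.2.2 (by omega))
        11 0 (by omega) (by omega) (by omega) (by omega)
      rw [this, pvSeg]
      simp
    · rw [if_neg hm]
      have hne : (some wh[i] == some wr[j]) = false := by
        apply beq_false_of_ne
        intro hcon
        apply hm
        rw [hih, hjr]
        exact beq_of_eq (by injection hcon with h; exact h.symm)
      rw [pyLoopA]
      rw [hget0, hget0', hne]
      simp

-- A's inner fold over all of range n_r equals acc ++ pvH i
theorem innerA_eq (wh wr : List String) (i : Nat) (hi : i < wh.length)
    (acc : List (List Int)) :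
    (List.range wr.length).foldl (fun acc2 (start_r : Nat) =>
      if ((start_r : Int) - (i : Int)).natAbs > 50 then acc2
      else acc2 ++ pyLoopA wh wr i start_r 0 11) acc = acc ++ pvH wh wr i := by
  have step1 : (List.range wr.length).foldl (fun acc2 (start_r : Nat) =>
      if ((start_r : Int) - (i : Int)).natAbs > 50 then acc2
      else acc2 ++ pyLoopA wh wr i start_r 0 11) acc =
      (List.range wr.length).foldl (fun acc2 (j : Nat) => acc2 ++
        (if ((j : Int) - (i : Int)).natAbs > 50 then []
         else pyLoopA wh wr i j 0 11)) acc :=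
    PySem.List.foldl_congr_mem _ _ _ _ (by intro acc2 j _; split <;> simp)
  rw [step1, PySem.List.foldl_append_eq_flatMap, pvH]
  congr 1
  apply List.flatMap_congr
  intro j hj
  exact pyLoopA_term_eq wh wr i j hi (List.mem_range.mp hj)

-- ===== VERDICT (by name: the statement is the Claim_ definition above) =====
theorem find_shifted_pairs_py_spec : Claim_equal_find_shifted_pairs_py := by
  intro wh wr _
  unfold Spec_find_shifted_pairs_py find_shifted_pairs_py find_shifted_pairs_py_alt
  rw [outerB_eq wh wr wh 0 (by simp) []]
  have : (List.range wh.length).foldl (fun acc (start_h : Nat) =>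
      (List.range wr.length).foldl (fun acc2 (start_r : Nat) =>
        if ((start_r : Int) - (start_h : Int)).natAbs > 50 then acc2
        else acc2 ++ pyLoopA wh wr start_h start_r 0 11) acc) [] =
      (List.range wh.length).foldl (fun acc (i : Nat) => acc ++ pvH wh wr i) [] :=
    PySem.List.foldl_congr_mem _ _ _ _
      (by intro acc i hi; exact innerA_eq wh wr i (List.mem_range.mp hi) acc)
  rw [this, PySem.List.foldl_append_eq_flatMap, List.range_eq_range']
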